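-- pv_equiv track=rewrite | github.com/akshay-greenlang/Code-V1_GreenLang | packs/eu-compliance/PACK-015-double-materiality/templates/esrs_disclosure_map.py | _md_timeline
-- ===== SOURCE A (Python) =====
-- from typing import Any, Dict, List, Optional
--
-- def _md_timeline(data: Dict[str, Any]) -> str:
--     """Render implementation timeline."""
--     gaps = data.get("gaps_identified", [])
--     if not gaps:
--         return "## Implementation Timeline\n\n_No gaps require remediation._"
--
--     # Group by effort level
--     quick_wins = [g for g in gaps if g.get("effort_level") in ("low", "LOW")]
--     medium = [g for g in gaps if g.get("effort_level") in ("medium", "MEDIUM")]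
--     high_effort = [g for g in gaps if g.get("effort_level") in ("high", "HIGH", "very_high", "VERY_HIGH")]
--
--     lines = [
--         "## Implementation Timeline", "",
--         f"- **Quick Wins (0-2 weeks):** {len(quick_wins)} gap(s)",
--         f"- **Medium Term (2-8 weeks):** {len(medium)} gap(s)",
--         f"- **Long Term (8+ weeks):** {len(high_effort)} gap(s)",
--     ]
--     return "\n".join(lines)
-- ===== SOURCE B (Python) =====
-- _EFFORT_BUCKET = {
--     "low": 0, "LOW": 0,
--     "medium": 1, "MEDIUM": 1,
--     "high": 2, "HIGH": 2, "very_high": 2, "VERY_HIGH": 2,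
-- }
--
-- def _md_timeline(data):
--     """Render implementation timeline (single pass with three counters)."""
--     gaps = data.get("gaps_identified", [])
--     if not gaps:
--         return "## Implementation Timeline\n\n_No gaps require remediation._"
--     quick = med = long_ = 0
--     for g in gaps:
--         b = _EFFORT_BUCKET.get(g.get("effort_level"))
--         if b == 0:
--             quick += 1
--         elif b == 1:
--             med += 1
--         elif b == 2:
--             long_ += 1
--     return "\n".join([
--         "## Implementation Timeline", "",
--         f"- **Quick Wins (0-2 weeks):** {quick} gap(s)",
--         f"- **Medium Term (2-8 weeks):** {med} gap(s)",
--         f"- **Long Term (8+ weeks):** {long_} gap(s)",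
--     ])
-- ===== Notes on version B (the rewrite author's own statement) =====
-- stated objective: alternative
-- what changed: Replaces the three independent filtering list comprehensions with a single pass over the gaps maintaining three integer counters, classifying each gap's effort_level via one bucket-dict lookup.
import Mathlib
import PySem

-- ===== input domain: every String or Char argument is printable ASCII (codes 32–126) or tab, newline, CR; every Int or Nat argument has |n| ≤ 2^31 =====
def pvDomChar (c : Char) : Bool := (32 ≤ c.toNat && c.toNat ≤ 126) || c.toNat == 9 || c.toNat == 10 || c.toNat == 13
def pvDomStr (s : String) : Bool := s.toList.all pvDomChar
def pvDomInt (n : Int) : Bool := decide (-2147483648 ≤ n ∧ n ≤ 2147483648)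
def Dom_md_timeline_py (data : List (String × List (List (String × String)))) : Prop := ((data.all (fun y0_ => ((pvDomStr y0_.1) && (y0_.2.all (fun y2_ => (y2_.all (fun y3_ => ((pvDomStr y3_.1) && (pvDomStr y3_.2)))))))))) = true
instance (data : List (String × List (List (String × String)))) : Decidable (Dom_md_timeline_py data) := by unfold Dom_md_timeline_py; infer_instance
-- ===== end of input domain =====

-- One honest line: B replaces A's three filtering passes over the gaps by a single
-- fold maintaining three counters, classifying each gap with one bucket-dict lookup
-- (objective: alternative decomposition, same cost class).

-- ===== PORT A =====
-- g.get("effort_level")  (dict-as-assoc-list: first match, default None)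
def pvEffort (g : List (String × String)) : Option String :=
  (g.find? (fun p => p.1 == "effort_level")).map (·.2)

-- data.get("gaps_identified", [])
def pvGaps (data : List (String × List (List (String × String)))) :
    List (List (String × String)) :=
  match data.find? (fun p => p.1 == "gaps_identified") with
  | some p => p.2
  | none => []

def md_timeline_py (data : List (String × List (List (String × String)))) : String :=
  let gaps := pvGaps data
  if gaps.isEmpty then "## Implementation Timeline\n\n_No gaps require remediation._"
  else
    let quick_wins := gaps.filter (fun g => pvEffort g == some "low" || pvEffort g == some "LOW")
    let medium := gaps.filter (fun g => pvEffort g == some "medium" || pvEffort g == some "MEDIUM")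
    let high_effort := gaps.filter (fun g => pvEffort g == some "high" || pvEffort g == some "HIGH"
        || pvEffort g == some "very_high" || pvEffort g == some "VERY_HIGH")
    "## Implementation Timeline" ++ "\n" ++ "" ++ "\n"
      ++ "- **Quick Wins (0-2 weeks):** " ++ PySem.Int.toStr (quick_wins.length : Int) ++ " gap(s)" ++ "\n"
      ++ "- **Medium Term (2-8 weeks):** " ++ PySem.Int.toStr (medium.length : Int) ++ " gap(s)" ++ "\n"
      ++ "- **Long Term (8+ weeks):** " ++ PySem.Int.toStr (high_effort.length : Int) ++ " gap(s)"

-- ===== PORT B =====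
-- the module-level _EFFORT_BUCKET dict of Source B
def pvEffortBucket : PySem.Dict String Int :=
  PySem.Dict.ofList [("low", 0), ("LOW", 0), ("medium", 1), ("MEDIUM", 1),
                     ("high", 2), ("HIGH", 2), ("very_high", 2), ("VERY_HIGH", 2)]

-- _EFFORT_BUCKET.get(g.get("effort_level"))  (a None key is never in the dict)
def pvBucket (g : List (String × String)) : Option Int :=
  match pvEffort g with
  | some s => pvEffortBucket.get? s
  | none => none

-- loop body of Source B: classify one gap and bump the matching counter
def pvStep (c : Int × Int × Int) (g : List (String × String)) : Int × Int × Int :=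
  match pvBucket g with
  | some 0 => (c.1 + 1, c.2.1, c.2.2)
  | some 1 => (c.1, c.2.1 + 1, c.2.2)
  | some 2 => (c.1, c.2.1, c.2.2 + 1)
  | _ => c

def md_timeline_py_alt (data : List (String × List (List (String × String)))) : String :=
  let gaps := pvGaps data
  if gaps.isEmpty then "## Implementation Timeline\n\n_No gaps require remediation._"
  else
    let c := gaps.foldl pvStep (0, 0, 0)
    "## Implementation Timeline" ++ "\n" ++ "" ++ "\n"
      ++ "- **Quick Wins (0-2 weeks):** " ++ PySem.Int.toStr c.1 ++ " gap(s)" ++ "\n"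
      ++ "- **Medium Term (2-8 weeks):** " ++ PySem.Int.toStr c.2.1 ++ " gap(s)" ++ "\n"
      ++ "- **Long Term (8+ weeks):** " ++ PySem.Int.toStr c.2.2 ++ " gap(s)"

-- ===== PRECONDITION & SPEC =====
def Spec_md_timeline_py (data : List (String × List (List (String × String)))) (out : String) : Prop := out = md_timeline_py_alt data
instance (data : List (String × List (List (String × String)))) (out : String) : Decidable (Spec_md_timeline_py data out) := by unfold Spec_md_timeline_py; infer_instance

-- ===== CLAIM (what is proved, stated in full; the proofs are below) =====
def Claim_equal_md_timeline_py : Prop := ∀ (data : List (String × List (List (String × String)))), Dom_md_timeline_py data → Spec_md_timeline_py data (md_timeline_py data)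

-- ===== LEMMAS AND PROOFS =====

-- B's fold computes A's three filter-lengths.
lemma pv_fold_counts (gaps : List (List (String × String))) (q m l : Int) :
    gaps.foldl pvStep (q, m, l)
    = (q + ((gaps.filter (fun g => pvEffort g == some "low" || pvEffort g == some "LOW")).length : Int),
       m + ((gaps.filter (fun g => pvEffort g == some "medium" || pvEffort g == some "MEDIUM")).length : Int),
       l + ((gaps.filter (fun g => pvEffort g == some "high" || pvEffort g == some "HIGH"
            || pvEffort g == some "very_high" || pvEffort g == some "VERY_HIGH")).length : Int)) := by
  induction gaps generalizing q m l with
  | nil => simp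
  | cons g rest ih =>
    rcases he : pvEffort g with _ | s
    · have hb : pvStep (q, m, l) g = (q, m, l) := by simp [pvStep, pvBucket, he]
      rw [List.foldl_cons, hb, ih]
      simp [he]
    · by_cases h0 : s = "low" ∨ s = "LOW"
      · have hb : pvStep (q, m, l) g = (q + 1, m, l) := by
          rcases h0 with h | h <;> subst h <;> simp [pvStep, pvBucket, he] <;> rfl
        rw [List.foldl_cons, hb, ih]
        rcases h0 with h | h <;> subst h <;>
          simp [he, Prod.ext_iff] <;> omega
      · by_cases h1 : s = "medium" ∨ s = "MEDIUM"
        · have hb : pvStep (q, m, l) g = (q, m + 1, l) := by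
            rcases h1 with h | h <;> subst h <;> simp [pvStep, pvBucket, he] <;> rfl
          rw [List.foldl_cons, hb, ih]
          rcases h1 with h | h <;> subst h <;>
            simp [he, Prod.ext_iff] <;> omega
        · by_cases h2 : s = "high" ∨ s = "HIGH" ∨ s = "very_high" ∨ s = "VERY_HIGH"
          · have hb : pvStep (q, m, l) g = (q, m, l + 1) := by
              rcases h2 with h | h | h | h <;> subst h <;> simp [pvStep, pvBucket, he] <;> rfl
            rw [List.foldl_cons, hb, ih]
            rcases h2 with h | h | h | h <;> subst h <;>
              simp [he, Prod.ext_iff] <;> omega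
          · push Not at h0 h1 h2
            have hg : pvEffortBucket.get? s = none := by
              have hmk : pvEffortBucket = PySem.Dict.mk
                  [("low", 0), ("LOW", 0), ("medium", 1), ("MEDIUM", 1),
                   ("high", 2), ("HIGH", 2), ("very_high", 2), ("VERY_HIGH", 2)] := by rfl
              simp [hmk, beq_iff_eq, PySem.Dict.get?,
                    Ne.symm h0.1, Ne.symm h0.2, Ne.symm h1.1, Ne.symm h1.2,
                    Ne.symm h2.1, Ne.symm h2.2.1, Ne.symm h2.2.2.1, Ne.symm h2.2.2.2]
            have hb : pvStep (q, m, l) g = (q, m, l) := by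
              simp [pvStep, pvBucket, he, hg]
            rw [List.foldl_cons, hb, ih]
            simp [he, h0.1, h0.2, h1.1, h1.2, h2.1, h2.2.1, h2.2.2.1, h2.2.2.2]

-- ===== VERDICT (by name: the statement is the Claim_ definition above) =====
theorem md_timeline_py_spec : Claim_equal_md_timeline_py := by
  intro data _
  unfold Spec_md_timeline_py md_timeline_py md_timeline_py_alt
  by_cases h : (pvGaps data).isEmpty
  · simp [h]
  · simp only [h, if_false, Bool.false_eq_true]
    rw [pv_fold_counts]
    simp
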